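-- pv_equiv track=rewrite | github.com/RamananVr/Leetcodepython | arrays_hash_table_sorting/2561_rearranging_fruits.py | minCostToMakeIdentical
-- ===== SOURCE A (Python) =====
-- from collections import Counter
--
-- def minCostToMakeIdentical(basket1, basket2):
--     # Count the frequency of each fruit type in both baskets
--     count1 = Counter(basket1)
--     count2 = Counter(basket2)
--
--     # Combine the counts to get the total frequency of each fruit type
--     total_count = count1 + count2
--
--     # Check if it's possible to make the baskets identical
--     for fruit, total in total_count.items():
--         if total % 2 != 0:
--             return -1  # If any fruit has an odd total count, it's impossible
--
--     # Find the minimum cost to make the baskets identical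
--     swaps = []
--     min_fruit = min(total_count.keys())  # Minimum fruit type for cost calculation
--
--     # Calculate excess fruits in basket1 and basket2
--     excess1 = []
--     excess2 = []
--     for fruit in total_count:
--         diff = count1[fruit] - total_count[fruit] // 2
--         if diff > 0:
--             excess1.extend([fruit] * diff)
--         elif diff < 0:
--             excess2.extend([fruit] * -diff)
--
--     # Sort excess fruits for minimum cost calculation
--     excess1.sort()
--     excess2.sort(reverse=True)
--
--     # Calculate the minimum cost of swaps
--     for i in range(len(excess1)):
--         swaps.append(min(excess1[i], excess2[i], 2 * min_fruit))
--
--     return sum(swaps)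
-- ===== SOURCE B (Python) =====
-- from collections import Counter
--
-- def minCostToMakeIdentical(basket1, basket2):
--     count1 = Counter(basket1)
--     total = count1 + Counter(basket2)
--
--     # Impossible unless every fruit occurs an even number of times overall
--     if any(v % 2 != 0 for v in total.values()):
--         return -1
--
--     cheapest = min(total.keys())
--
--     # One combined surplus list: |count1[f] - total[f] // 2| copies of each fruit
--     surplus = []
--     for fruit in total:
--         surplus.extend([fruit] * abs(count1[fruit] - total[fruit] // 2))
--     surplus.sort()
--
--     # Each swap settles one cheap surplus against one expensive one: pay the
--     # cheaper half, never more than routing through twice the cheapest fruit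
--     half = len(surplus) // 2
--     return sum(min(x, 2 * cheapest) for x in surplus[:half])
-- ===== Notes on version B (the rewrite author's own statement) =====
-- stated objective: simpler
-- what changed: A pairs an ascending-sorted excess1 with a descending-sorted excess2 index by index; B builds one combined surplus list (|count1[f] - total[f]//2| copies per fruit), sorts it once ascending and sums min(x, 2*cheapest) over its cheaper half.
-- outside the precondition, e.g. on minCostToMakeIdentical([1], [1, 2, 2, 3, 3]): A returns 0, B returns 2; on minCostToMakeIdentical([], []): A raises ValueError, B raises ValueError
import Mathlib
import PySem

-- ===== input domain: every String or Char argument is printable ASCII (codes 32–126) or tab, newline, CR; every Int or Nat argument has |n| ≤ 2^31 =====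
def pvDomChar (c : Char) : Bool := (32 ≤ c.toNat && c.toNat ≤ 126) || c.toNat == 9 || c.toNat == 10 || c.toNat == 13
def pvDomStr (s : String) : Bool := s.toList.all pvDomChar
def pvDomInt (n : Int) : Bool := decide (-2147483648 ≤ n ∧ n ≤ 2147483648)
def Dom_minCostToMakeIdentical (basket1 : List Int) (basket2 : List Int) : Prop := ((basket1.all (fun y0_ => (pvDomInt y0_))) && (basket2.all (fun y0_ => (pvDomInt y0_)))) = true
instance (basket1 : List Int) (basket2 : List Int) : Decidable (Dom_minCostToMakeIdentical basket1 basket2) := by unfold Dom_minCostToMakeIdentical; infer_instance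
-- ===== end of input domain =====

-- B replaces A's two-sorted-lists index pairing by one combined surplus list sorted once,
-- summing min(x, 2*cheapest) over its cheaper half (objective: simpler decomposition).

-- B replaces A's two-sorted-lists index pairing by one combined surplus list sorted once,
-- summing min(x, 2*cheapest) over its cheaper half (objective: simpler decomposition).

-- ===== PORT A =====
-- Counter.__add__: self's items (counts summed) in self's key order, then other's new keys;
-- only positive results are kept (exact for Counter semantics).
def counterAdd (d1 d2 : PySem.Dict Int Int) : PySem.Dict Int Int :=
  PySem.Dict.mk
    (((d1.items.map (fun p => (p.1, p.2 + d2.getD p.1 0))).filter (fun p => 0 < p.2)) ++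
     (d2.items.filter (fun p => !(d1.contains p.1) && 0 < p.2)))

def minCostToMakeIdentical (basket1 : List Int) (basket2 : List Int) : Int :=
  let count1 := PySem.Dict.counter basket1
  let count2 := PySem.Dict.counter basket2
  let total_count := counterAdd count1 count2
  if total_count.items.any (fun p => PySem.Int.mod p.2 2 != 0) then -1
  else
    let min_fruit := (PySem.List.min? total_count.keys (fun x => x)).getD 0
    let es := total_count.keys.foldl (fun (acc : List Int × List Int) fruit =>
        let diff := count1.getD fruit 0 - PySem.Int.floordiv (total_count.getD fruit 0) 2
        (if diff > 0 then acc.1 ++ List.replicate diff.toNat fruit else acc.1,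
         if diff < 0 then acc.2 ++ List.replicate (-diff).toNat fruit else acc.2)) ([], [])
    let excess1 := PySem.List.sorted es.1 (fun x => x)
    let excess2 := PySem.List.sorted es.2 (fun x => x) true
    let swaps := (PySem.List.pyRange 0 (PySem.List.len excess1) 1).foldl
        (fun sw i => sw ++ [min (min (PySem.List.pyGetD excess1 i 0) (PySem.List.pyGetD excess2 i 0)) (2 * min_fruit)]) []
    swaps.sum

def minCostToMakeIdentical_alt (basket1 : List Int) (basket2 : List Int) : Int :=
  let count1 := PySem.Dict.counter basket1
  let total := counterAdd count1 (PySem.Dict.counter basket2)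
  if total.values.any (fun v => PySem.Int.mod v 2 != 0) then -1
  else
    let cheapest := (PySem.List.min? total.keys (fun x => x)).getD 0
    let surplus := total.keys.foldl (fun acc fruit =>
        acc ++ List.replicate (count1.getD fruit 0 - PySem.Int.floordiv (total.getD fruit 0) 2).natAbs fruit) []
    let s := PySem.List.sorted surplus (fun x => x)
    let half := s.length / 2
    ((s.take half).map (fun x => min x (2 * cheapest))).sum


-- ===== PRECONDITION & SPEC =====
-- Pre_ keeps every input with some odd-total fruit (both return -1) and every nonempty pair of
-- equal-length baskets; it excludes empty baskets (A raises ValueError) and unequal-length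
-- baskets with all-even totals, on which A either raises IndexError or silently ignores
-- unmatched surplus.
def Pre_minCostToMakeIdentical (basket1 : List Int) (basket2 : List Int) : Prop :=
  (¬ ∀ x ∈ basket1 ++ basket2, (basket1 ++ basket2).count x % 2 = 0) ∨
  (basket1 ≠ [] ∧ basket1.length = basket2.length)
instance (basket1 : List Int) (basket2 : List Int) : Decidable (Pre_minCostToMakeIdentical basket1 basket2) := by
  unfold Pre_minCostToMakeIdentical; infer_instance
def pvWitness_minCostToMakeIdentical : List Int × List Int := ([1, 2, 2], [4, 1, 2])

def Spec_minCostToMakeIdentical (basket1 : List Int) (basket2 : List Int) (out : Int) : Prop := out = minCostToMakeIdentical_alt basket1 basket2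
instance (basket1 : List Int) (basket2 : List Int) (out : Int) : Decidable (Spec_minCostToMakeIdentical basket1 basket2 out) := by unfold Spec_minCostToMakeIdentical; infer_instance

-- ===== CLAIM (what is proved, stated in full; the proofs are below) =====
def Claim_equal_minCostToMakeIdentical : Prop := ∀ (basket1 : List Int) (basket2 : List Int), Dom_minCostToMakeIdentical basket1 basket2 → Pre_minCostToMakeIdentical basket1 basket2 → Spec_minCostToMakeIdentical basket1 basket2 (minCostToMakeIdentical basket1 basket2)

-- ===== LEMMAS AND PROOFS =====

def dK (basket1 basket2 : List Int) (f : Int) : Int :=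
  (basket1.count f : Int) - (((basket1 ++ basket2).count f) / 2 : Nat)

lemma counterAdd_counter (b1 b2 : List Int) :
    counterAdd (PySem.Dict.counter b1) (PySem.Dict.counter b2) = PySem.Dict.counter (b1 ++ b2) := by
  apply PySem.Dict.ext
  show (((PySem.Dict.counter b1).items.map (fun p => (p.1, p.2 + (PySem.Dict.counter b2).getD p.1 0))).filter (fun p => 0 < p.2)) ++
     ((PySem.Dict.counter b2).items.filter (fun p => !((PySem.Dict.counter b1).contains p.1) && 0 < p.2)) = _
  rw [PySem.Dict.items_counter, PySem.Dict.items_counter, PySem.Dict.items_counter,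
      PySem.Set.ofList_append, PySem.Set.update_eq_append_filter, List.map_append, List.map_map]
  congr 1
  · -- left part
    have hmap : (PySem.Set.ofList b1).map ((fun p => (p.1, p.2 + (PySem.Dict.counter b2).getD p.1 0)) ∘ fun k => (k, (b1.count k : Int)))
        = (PySem.Set.ofList b1).map (fun k => (k, (List.count k (b1 ++ b2) : Int))) := by
      apply List.map_congr_left
      intro k _
      simp [PySem.Dict.getD_counter, List.count_append]
    rw [hmap]
    apply List.filter_eq_self.mpr
    intro p hp
    obtain ⟨k, hk, rfl⟩ := List.mem_map.mp hp
    have hk1 : k ∈ b1 := by simpa [PySem.Set.mem_ofList] using hk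
    have h0 : 0 < List.count k (b1 ++ b2) := by
      rw [List.count_append]
      have := List.count_pos_iff.mpr hk1
      omega
    simpa using (by exact_mod_cast h0 : (0 : Int) < (List.count k (b1 ++ b2) : Int))
  · -- right part
    rw [List.filter_map]
    have hfil : (PySem.Set.ofList b2).filter ((fun p => !((PySem.Dict.counter b1)).contains p.1 && decide (0 < p.2)) ∘ fun k => (k, (b2.count k : Int)))
        = (PySem.Set.ofList b2).filter (fun y => !(PySem.Set.ofList b1).contains y) := by
      apply List.filter_congr
      intro k hk
      have hk2 : k ∈ b2 := by simpa [PySem.Set.mem_ofList] using hk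
      simp [PySem.Dict.contains_counter, PySem.Set.contains_eq_listContains]
      exact fun _ => hk2
    rw [hfil]
    apply List.map_congr_left
    intro k hk
    have hk1 : k ∉ b1 := by
      have := (List.mem_filter.mp hk).2
      simpa [PySem.Set.contains_eq_listContains, PySem.Set.mem_ofList, List.contains_iff_mem] using this
    simp [List.count_append, List.count_eq_zero_of_not_mem hk1]

lemma sum_indicator_count (keys : List Int) (a : Int) :
    (keys.map (fun k => if k = a then 1 else 0)).sum = keys.count a := by
  induction keys with
  | nil => simp
  | cons x xs ih =>
    by_cases h : x = a
    · simp [h, ih]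
      omega
    · simp [h, ih]

lemma sum_count_nodup_cover (keys : List Int) (l : List Int) (hnd : keys.Nodup)
    (hcov : ∀ x ∈ l, x ∈ keys) : (keys.map (fun k => l.count k)).sum = l.length := by
  induction l with
  | nil => simp
  | cons a l ih =>
    have hsum : (keys.map (fun k => (a :: l).count k)).sum
        = (keys.map (fun k => l.count k + if k = a then 1 else 0)).sum := by
      apply congrArg
      apply List.map_congr_left
      intro k _
      simp [List.count_cons, eq_comm (a := a)]
    rw [hsum, List.sum_map_add, sum_indicator_count,
        List.count_eq_one_of_mem hnd (hcov a (List.mem_cons_self)),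
        ih (fun x hx => hcov x (List.mem_cons_of_mem a hx))]
    simp

lemma zip_minmax_perm (a b : List Int) (h : a.length = b.length) :
    (List.zipWith min a b ++ List.zipWith max a b).Perm (a ++ b) := by
  induction a generalizing b with
  | nil => simp at h; simp [List.length_eq_zero_iff.mp h.symm]
  | cons x a' ih =>
    cases b with
    | nil => simp at h
    | cons y b' =>
      simp only [List.zipWith_cons_cons, List.cons_append]
      have hmm : ([min x y, max x y] : List Int).Perm [x, y] := by
        rcases le_total x y with hxy | hxy
        · simp [min_eq_left hxy, max_eq_right hxy]
        · simpa [min_eq_right hxy, max_eq_left hxy] using List.Perm.swap x y []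
      exact ((List.Perm.cons _ List.perm_middle).trans
        ((List.Perm.cons _ (List.Perm.cons _ (ih b' (by simpa using h)))).trans
          ((hmm.append_right _).trans (List.Perm.cons _ (by simpa using (List.perm_middle (a := y) (l₁ := a') (l₂ := b')).symm)))))

lemma cross_le (a b : List Int) (_h : a.length = b.length)
    (ha : a.Pairwise (· ≤ ·)) (hb : b.Pairwise (fun x y => y ≤ x)) :
    ∀ p ∈ List.zipWith min a b, ∀ q ∈ List.zipWith max a b, p ≤ q := by
  intro p hp q hq
  rw [List.mem_iff_getElem] at hp hq
  obtain ⟨i, hi, rfl⟩ := hp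
  obtain ⟨j, hj, rfl⟩ := hq
  rw [List.length_zipWith] at hi hj
  have hia : i < a.length := lt_of_lt_of_le hi (min_le_left _ _)
  have hib : i < b.length := lt_of_lt_of_le hi (min_le_right _ _)
  have hja : j < a.length := lt_of_lt_of_le hj (min_le_left _ _)
  have hjb : j < b.length := lt_of_lt_of_le hj (min_le_right _ _)
  rw [List.getElem_zipWith, List.getElem_zipWith]
  rcases lt_trichotomy i j with hlt | rfl | hgt
  · have : a[i] ≤ a[j] := (List.pairwise_iff_getElem.mp ha) i j hia hja hlt
    exact le_trans (min_le_left _ _) (le_trans this (le_max_left _ _))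
  · exact le_trans (min_le_left _ _) (le_max_left _ _)
  · have : b[i] ≤ b[j] := (List.pairwise_iff_getElem.mp hb) j i hjb hib hgt
    exact le_trans (min_le_right _ _) (le_trans this (le_max_right _ _))

lemma pair_halves (a b : List Int) (h : a.length = b.length)
    (ha : a.Pairwise (· ≤ ·)) (hb : b.Pairwise (fun x y => y ≤ x)) :
    PySem.List.sorted (a ++ b) (fun x => x) =
      PySem.List.sorted (List.zipWith min a b) (fun x => x) ++
      PySem.List.sorted (List.zipWith max a b) (fun x => x) := by
  apply PySem.List.sorted_id_eq_of_perm_of_pairwise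
  · exact ((PySem.List.sorted_perm _ _ _).append (PySem.List.sorted_perm _ _ _)).trans
      (zip_minmax_perm a b h)
  · rw [List.pairwise_append]
    refine ⟨PySem.List.sorted_pairwise _ _, PySem.List.sorted_pairwise _ _, ?_⟩
    intro p hp q hq
    exact cross_le a b h ha hb p ((PySem.List.mem_sorted _ _ _ _).mp hp) q ((PySem.List.mem_sorted _ _ _ _).mp hq)

lemma range_map_eq_zipWith (a b : List Int) (F : Int → Int → Int) (h : a.length = b.length) :
    (List.range a.length).map (fun k => F (a.getD k 0) (b.getD k 0)) = List.zipWith F a b := by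
  apply List.ext_getElem
  · simp [h]
  · intro i hi hi2
    have hia : i < a.length := by simpa using hi
    have hib : i < b.length := by rw [← h]; simpa using hi
    simp only [List.getElem_map, List.getElem_range, List.getElem_zipWith]
    rw [List.getD_eq_getElem a 0 hia, List.getD_eq_getElem b 0 hib]

-- the diff computed by both ports is dK
lemma getD_diff_eq_dK (b1 b2 : List Int) (f : Int) :
    (PySem.Dict.counter b1).getD f 0 -
      PySem.Int.floordiv ((PySem.Dict.counter (b1 ++ b2)).getD f 0) 2 = dK b1 b2 f := by
  rw [PySem.Dict.getD_counter, PySem.Dict.getD_counter, dK]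
  have : PySem.Int.floordiv ((List.count f (b1 ++ b2) : Nat) : Int) 2
      = (((List.count f (b1 ++ b2)) / 2 : Nat) : Int) := by
    exact_mod_cast PySem.Int.floordiv_natCast (List.count f (b1 ++ b2)) 2
  rw [this]

-- the even case
lemma even_case (b1 b2 : List Int)
    (hev : ∀ x ∈ b1 ++ b2, (b1 ++ b2).count x % 2 = 0)
    (_hne : b1 ≠ []) (hlen : b1.length = b2.length) :
    minCostToMakeIdentical b1 b2 = minCostToMakeIdentical_alt b1 b2 := by
  have hK : (PySem.Set.ofList (b1 ++ b2)).Nodup := PySem.Set.nodup_ofList _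
  -- the guard is false
  have hguard : ((PySem.Dict.counter (b1 ++ b2)).items.any (fun p => PySem.Int.mod p.2 2 != 0)) = false := by
    rw [PySem.Dict.items_counter]
    rw [List.any_map]
    apply List.any_eq_false.mpr
    intro f hf
    have hfL : f ∈ b1 ++ b2 := (PySem.Set.mem_ofList _ _).mp hf
    have := hev f hfL
    simp
    rw [List.count_append] at this
    omega
  have hguardB : ((PySem.Dict.counter (b1 ++ b2)).values.any (fun v => PySem.Int.mod v 2 != 0)) = false := by
    simpa [PySem.Dict.values, List.any_map] using hguard
  simp only [minCostToMakeIdentical, minCostToMakeIdentical_alt, counterAdd_counter,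
    PySem.Dict.keys_counter, hguard, hguardB, Bool.false_eq_true, if_false]
  simp only [getD_diff_eq_dK]
  rw [PySem.List.foldl_append_eq_flatMap, List.nil_append]
  have hsplit : (List.foldl
      (fun (acc : List Int × List Int) fruit =>
        (if dK b1 b2 fruit > 0 then acc.1 ++ List.replicate (dK b1 b2 fruit).toNat fruit else acc.1,
         if dK b1 b2 fruit < 0 then acc.2 ++ List.replicate (-dK b1 b2 fruit).toNat fruit else acc.2))
      ([], []) (PySem.Set.ofList (b1 ++ b2)))
      = ((PySem.Set.ofList (b1 ++ b2)).foldl (fun acc fruit => acc ++ List.replicate (dK b1 b2 fruit).toNat fruit) [],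
         (PySem.Set.ofList (b1 ++ b2)).foldl (fun acc fruit => acc ++ List.replicate (-dK b1 b2 fruit).toNat fruit) []) := by
    rw [← PySem.List.foldl_prod_mk
      (f := fun acc fruit => acc ++ List.replicate (dK b1 b2 fruit).toNat fruit)
      (g := fun acc fruit => acc ++ List.replicate (-dK b1 b2 fruit).toNat fruit)]
    apply PySem.List.foldl_congr_mem
    intro acc x _
    simp only [Prod.mk.injEq]
    constructor
    · split_ifs with h
      · rfl
      · have h0 : (dK b1 b2 x).toNat = 0 := Int.toNat_of_nonpos (by omega)
        simp [h0]
    · split_ifs with h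
      · rfl
      · have h0 : (-dK b1 b2 x).toNat = 0 := Int.toNat_of_nonpos (by omega)
        simp [h0]
  rw [hsplit]
  simp only [PySem.List.foldl_append_eq_flatMap, List.nil_append]
  set K := PySem.Set.ofList (b1 ++ b2) with hKdef
  set c := (PySem.List.min? K (fun x => x)).getD 0 with hcdef
  set e1 := K.flatMap (fun f => List.replicate (dK b1 b2 f).toNat f) with he1
  set e2 := K.flatMap (fun f => List.replicate (-dK b1 b2 f).toNat f) with he2
  set sp := K.flatMap (fun f => List.replicate (dK b1 b2 f).natAbs f) with hsp
  set a := PySem.List.sorted e1 (fun x => x) with ha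
  set bb := PySem.List.sorted e2 (fun x => x) true with hbb
  set s := PySem.List.sorted sp (fun x => x) with hs
  -- length bookkeeping
  have hcov1 : ∀ x ∈ b1, x ∈ K := fun x hx => (PySem.Set.mem_ofList _ _).mpr (List.mem_append_left _ hx)
  have hcovL : ∀ x ∈ b1 ++ b2, x ∈ K := fun x hx => (PySem.Set.mem_ofList _ _).mpr hx
  have hS1 : (K.map (fun k => b1.count k)).sum = b1.length :=
    sum_count_nodup_cover K b1 hK hcov1
  have hSL : (K.map (fun k => (b1 ++ b2).count k)).sum = (b1 ++ b2).length :=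
    sum_count_nodup_cover K (b1 ++ b2) hK hcovL
  have hShalf : (K.map (fun k => (b1 ++ b2).count k / 2)).sum = b1.length := by
    have hpt : (K.map (fun k => (b1 ++ b2).count k)).sum
        = (K.map (fun k => (b1 ++ b2).count k / 2 + (b1 ++ b2).count k / 2)).sum := by
      apply congrArg
      apply List.map_congr_left
      intro f hf
      have := hev f ((PySem.Set.mem_ofList _ _).mp hf)
      omega
    rw [hSL] at hpt
    rw [List.sum_map_add] at hpt
    have hL : (b1 ++ b2).length = b1.length + b2.length := List.length_append
    omega
  have hPQ : (K.map (fun f => (dK b1 b2 f).toNat)).sum = (K.map (fun f => (-dK b1 b2 f).toNat)).sum := by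
    have hpt : (K.map (fun f => b1.count f + (-dK b1 b2 f).toNat)).sum
        = (K.map (fun f => (b1 ++ b2).count f / 2 + (dK b1 b2 f).toNat)).sum := by
      apply congrArg
      apply List.map_congr_left
      intro f _
      have hd : dK b1 b2 f = (b1.count f : Int) - (((b1 ++ b2).count f) / 2 : Nat) := rfl
      omega
    rw [List.sum_map_add, List.sum_map_add, hS1, hShalf] at hpt
    omega
  have hlen_e1 : e1.length = (K.map (fun f => (dK b1 b2 f).toNat)).sum := by
    simp [he1, List.length_flatMap, List.length_replicate]
  have hlen_e2 : e2.length = (K.map (fun f => (-dK b1 b2 f).toNat)).sum := by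
    simp [he2, List.length_flatMap, List.length_replicate]
  have hlen_sp : sp.length = e1.length + e2.length := by
    have hpt : (K.map (fun f => (dK b1 b2 f).natAbs)).sum
        = (K.map (fun f => (dK b1 b2 f).toNat + (-dK b1 b2 f).toNat)).sum := by
      apply congrArg
      apply List.map_congr_left
      intro f _
      omega
    rw [hlen_e1, hlen_e2]
    simp only [hsp, List.length_flatMap]
    have : ((fun a => (List.replicate (dK b1 b2 a).natAbs a).length) : Int → Nat)
        = fun f => (dK b1 b2 f).natAbs := by
      funext f
      simp [List.length_replicate]
    rw [this, hpt, List.sum_map_add]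
  have hab : a.length = bb.length := by
    rw [ha, hbb, PySem.List.length_sorted, PySem.List.length_sorted, hlen_e1, hlen_e2, hPQ]
  -- s is the sorted pairing
  have hperm : sp.Perm (a ++ bb) := by
    have hfe : (fun f => List.replicate (dK b1 b2 f).natAbs f)
        = fun f => List.replicate (dK b1 b2 f).toNat f ++ List.replicate (-dK b1 b2 f).toNat f := by
      funext f
      rw [← List.replicate_add]
      congr 1
      omega
    rw [hsp, hfe]
    exact (List.flatMap_append_perm K _ _).symm.trans
      (((PySem.List.sorted_perm e1 (fun x => x) false).append (PySem.List.sorted_perm e2 (fun x => x) true)).symm)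
  have hsAB : s = PySem.List.sorted (List.zipWith min a bb) (fun x => x) ++
      PySem.List.sorted (List.zipWith max a bb) (fun x => x) := by
    rw [hs, PySem.List.sorted_eq_sorted_of_perm sp (a ++ bb) (fun x => x) (fun u v h => h) hperm]
    exact pair_halves a bb hab (PySem.List.sorted_pairwise e1 _) (PySem.List.sorted_pairwise_rev e2 _)
  have htake : s.take (s.length / 2) = PySem.List.sorted (List.zipWith min a bb) (fun x => x) := by
    have hsPlen : (PySem.List.sorted (List.zipWith min a bb) (fun x => x)).length = a.length := by
      rw [PySem.List.length_sorted, List.length_zipWith]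
      omega
    have hsQlen : (PySem.List.sorted (List.zipWith max a bb) (fun x => x)).length = a.length := by
      rw [PySem.List.length_sorted, List.length_zipWith]
      omega
    rw [hsAB, List.length_append, hsPlen, hsQlen,
        show (a.length + a.length) / 2 = a.length by omega]
    exact List.take_left' hsPlen
  rw [htake]
  -- A's loop is the zipWith sum
  rw [PySem.List.len_eq, PySem.List.pyRange_zero_nat, ← List.map_eq_flatMap, List.map_map]
  have hmapA : (List.range a.length).map
      ((fun i => min (min (PySem.List.pyGetD a i 0) (PySem.List.pyGetD bb i 0)) (2 * c)) ∘ (fun k : Nat => (k : Int)))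
      = List.zipWith (fun x y => min (min x y) (2 * c)) a bb := by
    rw [← range_map_eq_zipWith a bb _ hab]
    apply List.map_congr_left
    intro k _
    simp [PySem.List.pyGetD_natCast]
  rw [hmapA, ← List.map_zipWith (f := fun v => min v (2 * c)) (g := min)]
  exact (((PySem.List.sorted_perm (List.zipWith min a bb) (fun x => x) false).map _).sum_eq).symm


-- odd case: both guards fire
lemma guard_true_of_odd (b1 b2 : List Int)
    (h : ∃ f ∈ b1 ++ b2, ¬ (b1 ++ b2).count f % 2 = 0) :
    ((PySem.Dict.counter (b1 ++ b2)).items.any (fun p => PySem.Int.mod p.2 2 != 0)) = true := by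
  obtain ⟨f, hf, hodd⟩ := h
  rw [PySem.Dict.items_counter, List.any_map]
  apply List.any_eq_true.mpr
  refine ⟨f, (PySem.Set.mem_ofList _ _).mpr hf, ?_⟩
  have h3 : List.count f (b1 ++ b2) % 2 = 1 := by omega
  simp
  rw [List.count_append] at h3
  omega

-- ===== VERDICT (by name: the statement is the Claim_ definition above) =====
theorem minCostToMakeIdentical_spec : Claim_equal_minCostToMakeIdentical := by
  intro b1 b2 _ hpre
  unfold Spec_minCostToMakeIdentical
  by_cases hev : ∀ x ∈ b1 ++ b2, (b1 ++ b2).count x % 2 = 0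
  · rcases hpre with h | ⟨hne, hlen⟩
    · exact absurd hev h
    · exact even_case b1 b2 hev hne hlen
  · rw [not_forall] at hev
    have hev' : ∃ f ∈ b1 ++ b2, ¬ (b1 ++ b2).count f % 2 = 0 := by
      obtain ⟨x, hx⟩ := hev
      rw [Classical.not_imp] at hx
      exact ⟨x, hx.1, hx.2⟩
    have hg := guard_true_of_odd b1 b2 hev'
    have hgB : ((PySem.Dict.counter (b1 ++ b2)).values.any (fun v => PySem.Int.mod v 2 != 0)) = true := by
      simpa [PySem.Dict.values, List.any_map] using hg
    simp only [minCostToMakeIdentical, minCostToMakeIdentical_alt, counterAdd_counter, hg, hgB, if_true]
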